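-- pv_equiv track=rewrite | github.com/DivyankR/Programming-Assignments-FSDS- | P_Assignment24.py | sorted_by_length
-- ===== SOURCE A (Python) =====
-- def sorted_by_length(l):
--     d={}
--     for i in l:
--         d.update({len(i):i})
--     d = sorted(d.items())
--     l.clear()
--     for i,j in d:
--         l.append(j)
--     return l
-- ===== SOURCE B (Python) =====
-- def sorted_by_length(l):
--     # stable sort by length first, then one pass compressing each run of
--     # equal-length strings to its last element (= last original occurrence,
--     # because the sort is stable); mutates l in place like A and returns it
--     s = sorted(l, key=len)
--     res = []
--     for x in s:
--         if res and len(res[-1]) == len(x):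
--             res[-1] = x
--         else:
--             res.append(x)
--     l.clear()
--     l.extend(res)
--     return l
-- ===== Notes on version B (the rewrite author's own statement) =====
-- stated objective: alternative
-- what changed: Instead of building a length-keyed dict (overwrites keep the last occurrence) and sorting its items, B stably sorts the whole list by length and compresses each run of equal-length strings to its last element in a single pass.
import Mathlib
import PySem

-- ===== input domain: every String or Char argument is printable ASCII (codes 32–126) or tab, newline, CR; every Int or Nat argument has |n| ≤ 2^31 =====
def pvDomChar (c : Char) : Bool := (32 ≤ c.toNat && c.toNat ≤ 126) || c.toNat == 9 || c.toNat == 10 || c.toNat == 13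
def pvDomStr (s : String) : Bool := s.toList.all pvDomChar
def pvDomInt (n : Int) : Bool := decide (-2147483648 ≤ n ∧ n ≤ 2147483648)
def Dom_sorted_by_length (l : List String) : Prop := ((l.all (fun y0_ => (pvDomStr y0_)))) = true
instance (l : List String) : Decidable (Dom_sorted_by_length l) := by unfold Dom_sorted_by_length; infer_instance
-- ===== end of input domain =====

-- B replaces A's length-keyed dict (whose overwrites keep the last occurrence per length) plus a
-- sort of its items by one stable sort of the whole list by length followed by a single pass that
-- compresses each run of equal-length strings to its last element; both Pythons mutate l in place
-- identically, the equivalence proved is about the return value.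

-- ===== PORT A =====
def sorted_by_length (l : List String) : List String :=
  let d := l.foldl (fun d i => d.update [((PySem.Str.len i : Int), i)])
    (PySem.Dict.empty : PySem.Dict Int String)
  let ds := PySem.List.sorted2 d.items (fun p => p.1) (fun p => p.2)
  ds.foldl (fun acc p => acc ++ [p.2]) []

-- ===== PORT B =====
-- one step of Source B's run-compression loop: overwrite res[-1] when it has x's length, else append
def pvStep (res : List String) (x : String) : List String :=
  if res ≠ [] ∧ res.getLast?.map (fun y => PySem.Str.len y) = some (PySem.Str.len x)
  then res.dropLast ++ [x] else res ++ [x]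

def sorted_by_length_alt (l : List String) : List String :=
  let s := PySem.List.sorted l (fun x => (PySem.Str.len x : Int))
  s.foldl pvStep []

-- ===== PRECONDITION & SPEC =====
def Spec_sorted_by_length (l : List String) (out : List String) : Prop := out = sorted_by_length_alt l
instance (l : List String) (out : List String) : Decidable (Spec_sorted_by_length l out) := by unfold Spec_sorted_by_length; infer_instance

-- ===== CLAIM (what is proved, stated in full; the proofs are below) =====
def Claim_equal_sorted_by_length : Prop := ∀ (l : List String), Dom_sorted_by_length l → Spec_sorted_by_length l (sorted_by_length l)

-- ===== LEMMAS AND PROOFS =====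

-- the length of a string as a Python int
def pvLen (s : String) : Int := PySem.Str.len s

-- the last string of length k in xs (= first in xs.reverse), as an Option
def pvLastW (xs : List String) (k : Int) : Option String :=
  xs.reverse.find? (fun s => pvLen s == k)

-- the last string of length k in l, "" if none
def pvLast (l : List String) (k : Int) : String := (pvLastW l k).getD ""

-- the distinct lengths of l, in first-occurrence order
def pvKeys (l : List String) : PySem.Set Int := PySem.Set.ofList (l.map pvLen)

-- the distinct lengths of l, sorted ascending
def pvS (l : List String) : List Int := PySem.List.sorted (pvKeys l) (fun k => k)

-- the common normal form both programs compute
def pvRef (l : List String) : List String := (pvS l).map (pvLast l)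

theorem find?_len_isSome (t : List String) (k : Int) (hk : k ∈ t.map pvLen) :
    ∃ v, List.find? (fun s => pvLen s == k) t = some v := by
  cases h : List.find? (fun s => pvLen s == k) t with
  | some v => exact ⟨v, rfl⟩
  | none =>
    exfalso
    rw [List.find?_eq_none] at h
    obtain ⟨s, hs, hl⟩ := List.mem_map.1 hk
    exact h s hs (by simp [hl])

theorem insertBy_congr {α : Type} (b1 b2 : α → α → Bool) (x : α) (ys : List α)
    (h : ∀ y ∈ ys, b1 x y = b2 x y) :
    PySem.List.insertBy b1 x ys = PySem.List.insertBy b2 x ys := by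
  induction ys with
  | nil => rfl
  | cons y t ih =>
    simp only [PySem.List.insertBy]
    rw [h y (by simp)]
    by_cases hb : b2 x y = true
    · simp [hb]
    · simp only [Bool.not_eq_true] at hb
      simp [hb, ih (fun z hz => h z (by simp [hz]))]

theorem foldl_insertBy_congr {α : Type} (b1 b2 : α → α → Bool) :
    ∀ (xs acc : List α),
    (∀ a ∈ xs, ∀ y, (y ∈ acc ∨ y ∈ xs) → b1 a y = b2 a y) →
    xs.foldl (fun r x => PySem.List.insertBy b1 x r) acc
      = xs.foldl (fun r x => PySem.List.insertBy b2 x r) acc := by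
  intro xs
  induction xs with
  | nil => intro acc _; rfl
  | cons x t ih =>
    intro acc h
    simp only [List.foldl_cons]
    rw [insertBy_congr b1 b2 x acc (fun y hy => h x (by simp) y (Or.inl hy))]
    exact ih _ (fun a ha y hy => by
      rcases hy with hy | hy
      · rcases (PySem.List.mem_insertBy _ _ _ _).1 hy with rfl | hy
        · exact h a (by simp [ha]) y (Or.inr (by simp))
        · exact h a (by simp [ha]) y (Or.inl hy)
      · exact h a (by simp [ha]) y (Or.inr (by simp [hy])))

theorem sorted2_eq_sorted {α κ₁ κ₂ : Type} [LinearOrder κ₁] [LinearOrder κ₂]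
    (xs : List α) (k1 : α → κ₁) (k2 : α → κ₂)
    (hinj : ∀ a ∈ xs, ∀ b ∈ xs, k1 a = k1 b → a = b) :
    PySem.List.sorted2 xs k1 k2 = PySem.List.sorted xs k1 := by
  rw [PySem.List.sorted_eq_foldl_insertBy]
  show xs.foldl (fun r x => PySem.List.insertBy
      (fun a b => decide (k1 a < k1 b) || (!decide (k1 b < k1 a) && decide (k2 a < k2 b))) x r) []
    = xs.foldl (fun r x => PySem.List.insertBy (fun a b => decide (k1 a < k1 b)) x r) []
  apply foldl_insertBy_congr
  intro a ha y hy
  rcases hy with hy | hy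
  · simp at hy
  · by_cases h1 : k1 a < k1 y
    · simp [h1]
    · by_cases h2 : k1 y < k1 a
      · simp [h1, h2]
      · have : a = y := hinj a ha y hy (le_antisymm (not_lt.1 h2) (not_lt.1 h1))
        subst this
        simp

-- A's dict lookup is the last occurrence: get? k = find? over l.reverse, falling back to d
theorem foldl_insert_get? (l : List String) :
    ∀ (d : PySem.Dict Int String) (k : Int),
    (l.foldl (fun d i => d.insert (pvLen i) i) d).get? k
      = ((l.reverse.find? (fun s => pvLen s == k)).map some).getD (d.get? k) := by
  induction l with
  | nil => intro d k; rfl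
  | cons x t ih =>
    intro d k
    simp only [List.foldl_cons, List.reverse_cons]
    rw [ih, List.find?_append]
    cases h : t.reverse.find? (fun s => pvLen s == k) with
    | some v => simp
    | none =>
      by_cases hx : pvLen x = k
      · simp [hx]
      · simp [PySem.Dict.get?_insert, hx, Ne.symm hx]

theorem keysA_eq (l : List String) :
    (l.foldl (fun d i => d.insert (pvLen i) i) (PySem.Dict.empty : PySem.Dict Int String)).keys
      = pvKeys l := by
  have h := PySem.Dict.keys_foldl_insert_key l pvLen (fun _ i => i)
    (PySem.Dict.empty : PySem.Dict Int String)
  rw [PySem.Dict.keys_empty] at h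
  exact h.trans (PySem.Set.ofList_eq_foldl (l.map pvLen)).symm

theorem nodup_keysA (l : List String) :
    (l.foldl (fun d i => d.insert (pvLen i) i) (PySem.Dict.empty : PySem.Dict Int String)).keys.Nodup :=
  PySem.Dict.nodup_keys_foldl_insert_key l pvLen (fun _ i => i) _ PySem.Dict.nodup_keys_empty

theorem getDA_eq (l : List String) (k : Int) (hk : k ∈ pvKeys l) :
    (l.foldl (fun d i => d.insert (pvLen i) i) (PySem.Dict.empty : PySem.Dict Int String)).getD k ""
      = pvLast l k := by
  have hk' : k ∈ l.reverse.map pvLen := by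
    rw [List.map_reverse, List.mem_reverse]
    exact (PySem.Set.mem_ofList _ _).1 hk
  obtain ⟨v, hv⟩ := find?_len_isSome l.reverse k hk'
  rw [PySem.Dict.getD_eq_get?_getD, foldl_insert_get? l PySem.Dict.empty k, hv]
  simp [pvLast, pvLastW, hv]

-- the output loop of A appends the second components
theorem foldl_push (ds : List (Int × String)) :
    ∀ acc, ds.foldl (fun acc p => acc ++ [p.2]) acc = acc ++ ds.map (fun p => p.2) := by
  induction ds with
  | nil => intro acc; simp
  | cons p t ih => intro acc; simp [ih]

theorem pvS_pairwise (l : List String) : (pvS l).Pairwise (fun a b => a < b) :=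
  PySem.List.sorted_ofList_pairwise_lt (l.map pvLen)

theorem A_eq (l : List String) : sorted_by_length l = pvRef l := by
  show (PySem.List.sorted2
      ((l.foldl (fun d i => d.insert (pvLen i) i) (PySem.Dict.empty : PySem.Dict Int String)).items)
      (fun p => p.1) (fun p => p.2)).foldl (fun acc p => acc ++ [p.2]) [] = pvRef l
  rw [foldl_push]
  have hnd := nodup_keysA l
  have hmapfst : (((l.foldl (fun d i => d.insert (pvLen i) i)
      (PySem.Dict.empty : PySem.Dict Int String)).items).map (fun p => p.1)).Nodup := hnd
  rw [sorted2_eq_sorted _ _ _ (fun a ha b hb hab => List.inj_on_of_nodup_map hmapfst ha hb hab)]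
  have hitems : ((l.foldl (fun d i => d.insert (pvLen i) i)
      (PySem.Dict.empty : PySem.Dict Int String)).items)
      = (pvKeys l).map (fun k => (k, pvLast l k)) := by
    rw [PySem.Dict.items_eq_map_keys _ hnd "", keysA_eq]
    exact List.map_congr_left (fun k hk => by rw [getDA_eq l k hk])
  have hsorted : PySem.List.sorted
      ((l.foldl (fun d i => d.insert (pvLen i) i)
        (PySem.Dict.empty : PySem.Dict Int String)).items) (fun p => p.1)
      = (pvS l).map (fun k => (k, pvLast l k)) := by
    apply PySem.List.sorted_eq_of_perm_of_pairwise_lt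
    · rw [hitems]
      exact (PySem.List.sorted_perm (pvKeys l) (fun k => k) false).map _
    · rw [List.pairwise_map]
      exact pvS_pairwise l
  rw [hsorted, List.map_map]
  rfl

-- ---- B side: stability of the sort and the run-compression pass ----

-- pvLastW over an appended element: the new element is checked first
theorem pvLastW_append_singleton (xs : List String) (x : String) (k : Int) :
    pvLastW (xs ++ [x]) k = if pvLen x = k then some x else pvLastW xs k := by
  unfold pvLastW
  rw [List.reverse_append]
  by_cases h : pvLen x = k
  · have hb : (pvLen x == k) = true := by simp [h]
    simp [hb, h]
  · have hb : (pvLen x == k) = false := by simp [h]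
    simp [hb, h]

theorem pvLastW_cons (y : String) (xs : List String) (k : Int) :
    pvLastW (y :: xs) k
      = match pvLastW xs k with
        | some v => some v
        | none => if pvLen y = k then some y else none := by
  unfold pvLastW
  rw [List.reverse_cons, List.find?_append]
  cases h : xs.reverse.find? (fun s => pvLen s == k) with
  | some v => simp
  | none =>
    by_cases hy : pvLen y = k
    · simp [hy]
    · simp [hy]

-- inserting x into a key-sorted list: x becomes the last element of its length
theorem pvLastW_insertBy (x : String) (k : Int) :
    ∀ (acc : List String), acc.Pairwise (fun a b => pvLen a ≤ pvLen b) →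
    pvLastW (PySem.List.insertBy (fun a b => decide (pvLen a < pvLen b)) x acc) k
      = if pvLen x = k then some x else pvLastW acc k := by
  intro acc
  induction acc with
  | nil =>
    intro _
    show pvLastW [x] k = if pvLen x = k then some x else pvLastW [] k
    by_cases h : pvLen x = k
    · have hb : (pvLen x == k) = true := by simp [h]
      simp [pvLastW, hb, h]
    · have hb : (pvLen x == k) = false := by simp [h]
      simp [pvLastW, hb, h]
  | cons y t ih =>
    intro hp
    have hpt : t.Pairwise (fun a b => pvLen a ≤ pvLen b) := (List.pairwise_cons.1 hp).2
    have hyt : ∀ z ∈ t, pvLen y ≤ pvLen z := (List.pairwise_cons.1 hp).1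
    simp only [PySem.List.insertBy]
    by_cases hc : pvLen x < pvLen y
    · rw [if_pos (by simp [hc] : decide (pvLen x < pvLen y) = true)]
      by_cases hk : pvLen x = k
      · have hnone : pvLastW (y :: t) k = none := by
          unfold pvLastW
          rw [List.find?_eq_none]
          intro s hs
          rw [List.mem_reverse, List.mem_cons] at hs
          have hlt : pvLen x < pvLen s := by
            rcases hs with rfl | hs
            · exact hc
            · exact lt_of_lt_of_le hc (hyt s hs)
          simp only [beq_iff_eq]
          intro hsk
          rw [hsk, ← hk] at hlt
          exact lt_irrefl _ hlt
        rw [pvLastW_cons x (y :: t) k, hnone]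
      · rw [pvLastW_cons x (y :: t) k]
        cases h : pvLastW (y :: t) k <;> simp [hk, h]
    · rw [if_neg (by simp [hc] : ¬ decide (pvLen x < pvLen y) = true)]
      rw [pvLastW_cons y _ k, ih hpt, pvLastW_cons y t k]
      by_cases hk : pvLen x = k
      · simp [hk]
      · simp [hk]

-- stability: the last string of each length is the same before and after the sort
theorem pvLastW_sorted (l : List String) (k : Int) :
    pvLastW (PySem.List.sorted l pvLen) k = pvLastW l k := by
  induction l using List.reverseRecOn with
  | nil => rfl
  | append_singleton t x ih =>
    have hs : PySem.List.sorted (t ++ [x]) pvLen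
        = PySem.List.insertBy (fun a b => decide (pvLen a < pvLen b)) x
            (PySem.List.sorted t pvLen) := by
      rw [PySem.List.sorted_eq_foldl_insertBy, PySem.List.sorted_eq_foldl_insertBy,
        List.foldl_append]
      rfl
    have hpw : (PySem.List.sorted t pvLen).Pairwise (fun a b => pvLen a ≤ pvLen b) :=
      PySem.List.sorted_pairwise t pvLen
    rw [hs, pvLastW_insertBy x k _ hpw, ih, pvLastW_append_singleton]

-- PySem.Set.ofList is a sublist of its input
theorem ofList_sublist {α : Type} [DecidableEq α] (xs : List α) :
    (PySem.Set.ofList xs).Sublist xs := by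
  suffices h : ∀ (xs : List α) (acc : List α),
      ∃ u, xs.foldl PySem.Set.add acc = acc ++ u ∧ u.Sublist xs by
    obtain ⟨u, hu, hsub⟩ := h xs []
    rw [PySem.Set.ofList_eq_foldl, hu]
    simpa using hsub
  intro xs
  induction xs with
  | nil => intro acc; exact ⟨[], by simp, List.Sublist.refl _⟩
  | cons x t ih =>
    intro acc
    simp only [List.foldl_cons]
    by_cases hc : PySem.Set.contains acc x = true
    · have hadd : PySem.Set.add acc x = acc := by
        unfold PySem.Set.add; rw [hc]; simp
      rw [hadd]
      obtain ⟨u, hu, hsub⟩ := ih acc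
      exact ⟨u, hu, hsub.cons x⟩
    · have hadd : PySem.Set.add acc x = acc ++ [x] := by
        unfold PySem.Set.add
        rw [Bool.not_eq_true] at hc
        rw [hc]; simp
      rw [hadd]
      obtain ⟨u, hu, hsub⟩ := ih (acc ++ [x])
      exact ⟨x :: u, by simpa using hu, by simpa using hsub.cons₂ x⟩
  
-- keys of a key-sorted list, deduplicated, are strictly increasing
theorem keys_pairwise_lt (s : List String)
    (hpw : (s.map pvLen).Pairwise (fun a b => a ≤ b)) :
    (PySem.Set.ofList (s.map pvLen)).Pairwise (fun a b => a < b) := by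
  have hsub := ofList_sublist (s.map pvLen)
  have hle := List.Pairwise.sublist hsub hpw
  have hnd := PySem.Set.nodup_ofList (s.map pvLen)
  have := hle.and (List.Pairwise.imp (fun h => h) hnd)
  exact this.imp (fun ⟨h1, h2⟩ => lt_of_le_of_ne h1 h2)

-- the run-compression fold on a key-sorted list yields, per distinct length (in
-- increasing order), the last string of that length
theorem compress_spec :
    ∀ (s : List String), (s.map pvLen).Pairwise (fun a b => a ≤ b) →
    s.foldl pvStep []
      = (PySem.Set.ofList (s.map pvLen)).map (fun k => (pvLastW s k).getD "") := by
  intro s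
  induction s using List.reverseRecOn with
  | nil => intro _; rfl
  | append_singleton t x ih =>
    intro hpw
    have hmap : (t ++ [x]).map pvLen = t.map pvLen ++ [pvLen x] := by simp
    have hpwt : (t.map pvLen).Pairwise (fun a b => a ≤ b) := by
      rw [hmap] at hpw
      exact hpw.sublist (List.sublist_append_left _ _)
    have hle : ∀ k ∈ t.map pvLen, k ≤ pvLen x := by
      rw [hmap] at hpw
      intro k hk
      have := List.pairwise_append.1 hpw
      exact this.2.2 k hk (pvLen x) (by simp)
    have hK : PySem.Set.ofList ((t ++ [x]).map pvLen)
        = PySem.Set.add (PySem.Set.ofList (t.map pvLen)) (pvLen x) := by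
      rw [hmap, PySem.Set.ofList_eq_foldl, PySem.Set.ofList_eq_foldl, List.foldl_append]
      rfl
    have hf' : ∀ k, (pvLastW (t ++ [x]) k).getD ""
        = if pvLen x = k then x else (pvLastW t k).getD "" := by
      intro k
      rw [pvLastW_append_singleton]
      by_cases h : pvLen x = k <;> simp [h]
    set K := PySem.Set.ofList (t.map pvLen) with hKdef
    have hKlt : K.Pairwise (fun a b => a < b) := keys_pairwise_lt t hpwt
    have hKnd : K.Nodup := PySem.Set.nodup_ofList _
    have hKmem : ∀ k ∈ K, k ∈ t.map pvLen := fun k hk => (PySem.Set.mem_ofList _ _).1 hk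
    have hlen_f : ∀ k ∈ K, pvLen ((pvLastW t k).getD "") = k := by
      intro k hk
      obtain ⟨v, hv⟩ := find?_len_isSome t.reverse k (by
        rw [List.map_reverse, List.mem_reverse]; exact hKmem k hk)
      have := List.find?_some hv
      rw [beq_iff_eq] at this
      simp [pvLastW, hv, this]
    rw [List.foldl_append, List.foldl_cons, List.foldl_nil, ih hpwt, hK]
    by_cases hmem : pvLen x ∈ K
    · -- pvLen x is already a key: it must be the last key of K, and pvStep overwrites
      have hadd : PySem.Set.add K (pvLen x) = K := by
        unfold PySem.Set.add
        have : PySem.Set.contains K (pvLen x) = true := by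
          simp only [PySem.Set.contains, List.contains_iff_mem]
          exact hmem
        rw [this]; simp
      rw [hadd]
      -- K = K₁ ++ [pvLen x]
      obtain ⟨K₁, K₂, hsplit⟩ := List.mem_iff_append.1 hmem
      have hK₂ : K₂ = [] := by
        cases K₂ with
        | nil => rfl
        | cons z zs =>
          exfalso
          have hz : pvLen x < z := by
            rw [hsplit] at hKlt
            have := (List.pairwise_append.1 hKlt).2.2
            exact (List.pairwise_cons.1 (List.pairwise_append.1 hKlt).2.1).1 z (by simp)
          have hz2 : z ≤ pvLen x := hle z (hKmem z (by rw [hsplit]; simp))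
          exact absurd hz2 (not_le.2 hz)
      rw [hK₂] at hsplit
      have hxK₁ : pvLen x ∉ K₁ := by
        rw [hsplit] at hKnd
        intro hx
        have := (List.pairwise_append.1 (hsplit ▸ hKlt)).2.2 (pvLen x) hx (pvLen x) (by simp)
        exact lt_irrefl _ this
      have hmapK : K.map (fun k => (pvLastW t k).getD "")
          = K₁.map (fun k => (pvLastW t k).getD "") ++ [(pvLastW t (pvLen x)).getD ""] := by
        rw [hsplit]; simp
      have hlast : pvLen ((pvLastW t (pvLen x)).getD "") = pvLen x :=
        hlen_f (pvLen x) hmem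
      unfold pvStep
      rw [hmapK]
      rw [if_pos]
      · rw [List.dropLast_concat]
        rw [hsplit]
        simp only [List.map_append, List.map_cons, List.map_nil]
        congr 1
        · refine List.map_congr_left (fun k hk => ?_)
          rw [hf' k]
          have : pvLen x ≠ k := fun h => hxK₁ (h ▸ hk)
          simp [this]
        · rw [hf' (pvLen x)]
          simp
      · constructor
        · simp
        · rw [List.getLast?_concat]
          simp only [Option.map_some, Option.some.injEq]
          exact hlast
    · -- new key: pvStep appends
      have hadd : PySem.Set.add K (pvLen x) = K ++ [pvLen x] := by
        unfold PySem.Set.add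
        have : PySem.Set.contains K (pvLen x) = false := by
          simp only [PySem.Set.contains]
          rw [Bool.eq_false_iff]
          intro hc
          rw [List.contains_iff_mem] at hc
          exact hmem hc
        rw [this]; simp
      rw [hadd]
      unfold pvStep
      rw [if_neg]
      · simp only [List.map_append, List.map_cons, List.map_nil]
        congr 1
        · refine List.map_congr_left (fun k hk => ?_)
          rw [hf' k]
          have : pvLen x ≠ k := fun h => hmem (h ▸ hk)
          simp [this]
        · rw [hf' (pvLen x)]
          simp
      · rintro ⟨hne, hlast⟩
        cases hKe : K.map (fun k => (pvLastW t k).getD "") with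
        | nil => exact hne hKe
        | cons z zs =>
          have hKne : K ≠ [] := by
            intro h; rw [h] at hKe; simp at hKe
          obtain ⟨k₀, hk₀mem, hk₀⟩ : ∃ k₀, k₀ ∈ K ∧
              (K.map (fun k => (pvLastW t k).getD "")).getLast? 
                = some ((pvLastW t k₀).getD "") := by
            obtain ⟨K', k₀, hK'⟩ := List.eq_nil_or_concat K |>.resolve_left hKne
            refine ⟨k₀, by rw [hK']; simp, ?_⟩
            rw [hK']
            simp
          rw [hk₀] at hlast
          simp only [Option.map_some] at hlast
          have : pvLen ((pvLastW t k₀).getD "") = k₀ := hlen_f k₀ hk₀mem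
          rw [show PySem.Str.len ((pvLastW t k₀).getD "") = pvLen ((pvLastW t k₀).getD "") from rfl, this] at hlast
          have : k₀ = pvLen x := by
            have := Option.some.inj hlast
            exact this
          exact hmem (this ▸ hk₀mem)

theorem B_eq (l : List String) : sorted_by_length_alt l = pvRef l := by
  show (PySem.List.sorted l pvLen).foldl pvStep [] = pvRef l
  have hpw : ((PySem.List.sorted l pvLen).map pvLen).Pairwise (fun a b => a ≤ b) := by
    rw [List.pairwise_map]
    exact PySem.List.sorted_pairwise l pvLen
  rw [compress_spec _ hpw]
  have hkeys : PySem.List.sorted (pvKeys l) (fun k => k)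
      = PySem.Set.ofList ((PySem.List.sorted l pvLen).map pvLen) := by
    apply PySem.List.sorted_eq_of_perm_of_pairwise_lt
    · unfold pvKeys
      rw [List.perm_ext_iff_of_nodup (PySem.Set.nodup_ofList _) (PySem.Set.nodup_ofList _)]
      intro a
      rw [PySem.Set.mem_ofList, PySem.Set.mem_ofList]
      constructor
      · intro h
        exact ((PySem.List.sorted_perm l pvLen false).map pvLen).mem_iff.1 h
      · intro h
        exact ((PySem.List.sorted_perm l pvLen false).map pvLen).mem_iff.2 h
    · exact keys_pairwise_lt _ hpw
  unfold pvRef pvS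
  rw [hkeys]
  refine List.map_congr_left (fun k _ => ?_)
  unfold pvLast
  rw [pvLastW_sorted]

-- ===== VERDICT (by name: the statement is the Claim_ definition above) =====
theorem sorted_by_length_spec : Claim_equal_sorted_by_length := by
  intro l _
  unfold Spec_sorted_by_length
  rw [A_eq, B_eq]
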